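-- pv_equiv track=rewrite | github.com/Anhsnotes/enterprise_intelligent | ui/workflow_ui.py | group_workflows_for_display
-- ===== SOURCE A (Python) =====
-- WORKFLOW_CATEGORIES = [
--     "Finance & Control",
--     "Sales & Revenue",
--     "Procurement & Supply Chain",
--     "Operations & Manufacturing",
--     "Human Capital",
--     "Other",
-- ]
--
-- def group_workflows_for_display(workflows: list[dict]) -> list[tuple[str, list[dict]]]:
--     """
--     Returns (section_title, workflows in that section).
--     Order: WORKFLOW_CATEGORIES, then other category names A–Z, then uncategorised.
--     """
--     by_cat: dict[str | None, list[dict]] = {}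
--     for w in workflows:
--         by_cat.setdefault(w.get("category"), []).append(w)
--     for key in by_cat:
--         by_cat[key].sort(key=lambda x: x["name"])
--
--     sections: list[tuple[str, list[dict]]] = []
--     for cat in WORKFLOW_CATEGORIES:
--         if cat in by_cat:
--             sections.append((cat, by_cat.pop(cat)))
--     extras = sorted(
--         [k for k in by_cat.keys() if k is not None],
--         key=lambda x: str(x).lower(),
--     )
--     for cat in extras:
--         sections.append((cat, by_cat.pop(cat)))
--     if None in by_cat:
--         sections.append(("Uncategorised", by_cat.pop(None)))
--     return sections
-- ===== SOURCE B (Python) =====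
-- WORKFLOW_CATEGORIES = [
--     "Finance & Control",
--     "Sales & Revenue",
--     "Procurement & Supply Chain",
--     "Operations & Manufacturing",
--     "Human Capital",
--     "Other",
-- ]
--
--
-- def group_workflows_for_display(workflows: list[dict]) -> list[tuple[str, list[dict]]]:
--     # One pass recording categories in first-appearance order, then build the
--     # ordered category list and emit each section by filtering + sorting.
--     seen = []
--     for w in workflows:
--         c = w.get("category")
--         if c not in seen:
--             seen.append(c)
--     order = [c for c in WORKFLOW_CATEGORIES if c in seen]
--     order += sorted(
--         [c for c in seen if c is not None and c not in WORKFLOW_CATEGORIES],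
--         key=str.lower,
--     )
--     if None in seen:
--         order.append(None)
--     return [
--         ("Uncategorised" if c is None else c,
--          sorted([w for w in workflows if w.get("category") == c],
--                 key=lambda w: w["name"]))
--         for c in order
--     ]
-- ===== Notes on version B (the rewrite author's own statement) =====
-- stated objective: simpler
-- what changed: B drops A's dict-bucketing with phased pops entirely: one pass records categories in first-appearance order, the ordered section list is built up front, and each section is emitted by a filter-and-sort over the input.
import Mathlib
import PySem

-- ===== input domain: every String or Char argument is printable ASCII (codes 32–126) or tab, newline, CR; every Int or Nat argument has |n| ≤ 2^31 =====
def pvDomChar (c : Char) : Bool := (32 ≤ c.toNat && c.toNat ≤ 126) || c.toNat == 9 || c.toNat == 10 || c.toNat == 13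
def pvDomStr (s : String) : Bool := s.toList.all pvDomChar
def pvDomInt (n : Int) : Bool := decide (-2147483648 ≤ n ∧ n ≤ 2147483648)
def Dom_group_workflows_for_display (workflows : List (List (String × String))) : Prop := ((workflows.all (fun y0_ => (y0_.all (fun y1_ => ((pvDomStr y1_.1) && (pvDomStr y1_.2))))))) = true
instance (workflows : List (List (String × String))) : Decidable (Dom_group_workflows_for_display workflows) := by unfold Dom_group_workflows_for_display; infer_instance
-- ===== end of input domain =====

-- B replaces A's dict-bucketing with phased pops by a first-appearance scan that fixes the
-- section order up front and a filter+sort per section (objective: simpler; not faster).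

-- module-level constant WORKFLOW_CATEGORIES
def pvWC : List String :=
  ["Finance & Control", "Sales & Revenue", "Procurement & Supply Chain",
   "Operations & Manufacturing", "Human Capital", "Other"]

-- w.get("category")  (None = key absent; a workflow dict is an association list)
def pvCat (w : List (String × String)) : Option String := (PySem.Dict.mk w).get? "category"

-- x["name"] — total form; exact under Pre_ (every workflow has a "name" key)
def pvName (w : List (String × String)) : String := ((PySem.Dict.mk w).get? "name").getD ""

-- ===== PORT A =====
def group_workflows_for_display (workflows : List (List (String × String))) : List (String × (List (List (String × String)))) :=
  -- by_cat.setdefault(w.get("category"), []).append(w)  =  modify key [] (· ++ [w])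
  let byCat : PySem.Dict (Option String) (List (List (String × String))) :=
    workflows.foldl (fun d w => d.modify (pvCat w) [] (fun l => l ++ [w])) PySem.Dict.empty
  -- for key in by_cat: by_cat[key].sort(key=lambda x: x["name"])
  let byCat := byCat.keys.foldl
    (fun d k => d.insert k (PySem.List.sorted (d.getD k []) (fun x => pvName x) false)) byCat
  -- for cat in WORKFLOW_CATEGORIES: if cat in by_cat: sections.append((cat, by_cat.pop(cat)))
  -- pop under the contains-guard = lookup + erase (the key is present, so no KeyError)
  let st := pvWC.foldl
    (fun (p : List (String × (List (List (String × String)))) ×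
            PySem.Dict (Option String) (List (List (String × String)))) c =>
      if p.2.contains (some c) then
        (p.1 ++ [(c, p.2.getD (some c) [])], p.2.erase (some c))
      else p)
    ([], byCat)
  -- extras = sorted([k for k in by_cat.keys() if k is not None], key=lambda x: str(x).lower())
  -- (k is a str here, so str(k).lower() = k.lower(); k.getD "" unwraps the some)
  let extras := PySem.List.sorted (st.2.keys.filter (fun k => k.isSome))
      (fun k => PySem.Str.lower (k.getD "")) false
  -- for cat in extras: sections.append((cat, by_cat.pop(cat)))  — extras ⊆ keys, so pop = lookup + erase
  let st := extras.foldl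
    (fun (p : List (String × (List (List (String × String)))) ×
            PySem.Dict (Option String) (List (List (String × String)))) k =>
      (p.1 ++ [(k.getD "", p.2.getD k [])], p.2.erase k)) st
  -- if None in by_cat: sections.append(("Uncategorised", by_cat.pop(None)))
  if st.2.contains none then st.1 ++ [("Uncategorised", st.2.getD none [])] else st.1

-- ===== PORT B =====
def group_workflows_for_display_alt (workflows : List (List (String × String))) : List (String × (List (List (String × String)))) :=
  -- first-appearance scan: seen is a list of Optional[str] category values
  let seen : List (Option String) :=
    workflows.foldl (fun s w => let c := pvCat w; if c ∈ s then s else s ++ [c]) []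
  -- order = [c for c in WORKFLOW_CATEGORIES if c in seen]  (strings, represented as `some`)
  let order : List (Option String) := (pvWC.filter (fun c => decide (some c ∈ seen))).map some
  -- order += sorted([c for c in seen if c is not None and c not in WORKFLOW_CATEGORIES], key=str.lower)
  let order := order ++ PySem.List.sorted
      (seen.filter (fun c => c.isSome && !((pvWC.map some).contains c)))
      (fun c => PySem.Str.lower (c.getD "")) false
  -- if None in seen: order.append(None)
  let order := if none ∈ seen then order ++ [none] else order
  -- one section per category: title + filtered workflows sorted by name
  order.map (fun c =>
    ((match c with | none => "Uncategorised" | some s => s),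
     PySem.List.sorted (workflows.filter (fun w => pvCat w == c)) (fun w => pvName w) false))

-- ===== PRECONDITION & SPEC =====
-- Pre_ excludes exactly the inputs where the Python A raises KeyError: a workflow without a "name" key.
def Pre_group_workflows_for_display (workflows : List (List (String × String))) : Prop :=
  (workflows.all (fun w => (PySem.Dict.mk w).contains "name")) = true
instance (workflows : List (List (String × String))) : Decidable (Pre_group_workflows_for_display workflows) := by unfold Pre_group_workflows_for_display; infer_instance
def pvWitness_group_workflows_for_display : (List (List (String × String))) :=
  [[("name", "a"), ("category", "Other")], [("name", "b")]]
def Spec_group_workflows_for_display (workflows : List (List (String × String))) (out : List (String × (List (List (String × String))))) : Prop := out = group_workflows_for_display_alt workflows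
instance (workflows : List (List (String × String))) (out : List (String × (List (List (String × String))))) : Decidable (Spec_group_workflows_for_display workflows out) := by unfold Spec_group_workflows_for_display; infer_instance

-- ===== CLAIM (what is proved, stated in full; the proofs are below) =====
def Claim_equal_group_workflows_for_display : Prop := ∀ (workflows : List (List (String × String))), Dom_group_workflows_for_display workflows → Pre_group_workflows_for_display workflows → Spec_group_workflows_for_display workflows (group_workflows_for_display workflows)


-- ===== LEMMAS AND PROOFS =====

-- sorted (by name) of the workflows whose category is c — the common section body
def pvSF (ws : List (List (String × String))) (c : Option String) : List (List (String × String)) :=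
  PySem.List.sorted (ws.filter (fun w => pvCat w == c)) (fun w => pvName w) false

-- erase: lookups at other keys are unchanged
theorem pv_find?_filter_ne {κ ν : Type} [BEq κ] [LawfulBEq κ] (k c : κ) (h : c ≠ k) :
    ∀ (items : List (κ × ν)),
      (items.filter (fun p => !(p.1 == k))).find? (fun p => p.1 == c)
        = items.find? (fun p => p.1 == c) := by
  intro items
  induction items with
  | nil => rfl
  | cons p t ih =>
    by_cases hk : p.1 = k
    · have hc : (p.1 == c) = false := by
        rw [hk]; exact beq_eq_false_iff_ne.mpr (fun e => h e.symm)
      rw [List.filter_cons, if_neg (by simp [hk]),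
        List.find?_cons_of_neg (p := fun q : κ × ν => q.1 == c) (by simp [hc]), ih]
    · rw [List.filter_cons, if_pos (by simp [hk])]
      by_cases hc : (p.1 == c) = true
      · rw [List.find?_cons_of_pos (p := fun q : κ × ν => q.1 == c) hc,
          List.find?_cons_of_pos (p := fun q : κ × ν => q.1 == c) hc]
      · rw [List.find?_cons_of_neg (p := fun q : κ × ν => q.1 == c) hc,
          List.find?_cons_of_neg (p := fun q : κ × ν => q.1 == c) hc, ih]

theorem pv_get?_erase_of_ne {κ ν : Type} [BEq κ] [LawfulBEq κ] (d : PySem.Dict κ ν) (k c : κ)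
    (h : c ≠ k) : (d.erase k).get? c = d.get? c := by
  obtain ⟨items⟩ := d
  simp only [PySem.Dict.erase, PySem.Dict.get?, pv_find?_filter_ne k c h]

theorem pv_getD_erase_of_ne {κ ν : Type} [BEq κ] [LawfulBEq κ] (d : PySem.Dict κ ν) (k c : κ)
    (h : c ≠ k) (d0 : ν) : (d.erase k).getD c d0 = d.getD c d0 := by
  simp only [PySem.Dict.getD, pv_get?_erase_of_ne d k c h]

theorem pv_contains_erase_of_ne {κ ν : Type} [BEq κ] [LawfulBEq κ] (d : PySem.Dict κ ν) (k c : κ)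
    (h : c ≠ k) : (d.erase k).contains c = d.contains c := by
  rw [PySem.Dict.contains_eq_isSome_get?, PySem.Dict.contains_eq_isSome_get?,
    pv_get?_erase_of_ne d k c h]

theorem pv_keys_erase {κ ν : Type} [BEq κ] (d : PySem.Dict κ ν) (k : κ) :
    (d.erase k).keys = d.keys.filter (fun x => !(x == k)) := by
  obtain ⟨items⟩ := d
  simp only [PySem.Dict.erase, PySem.Dict.keys, List.filter_map]
  rfl

-- Set.update is the identity on already-present elements
theorem pv_update_of_mem {α : Type} [BEq α] [LawfulBEq α] :
    ∀ (xs : List α) (s : PySem.Set α), (∀ x ∈ xs, x ∈ s) → PySem.Set.update s xs = s := by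
  intro xs
  induction xs with
  | nil => intro s _; rfl
  | cons x t ih =>
    intro s h
    have hx : PySem.Set.add s x = s := by
      simp [PySem.Set.add, h x (List.mem_cons_self)]
    simp only [PySem.Set.update, List.foldl_cons, hx]
    exact ih s (fun y hy => h y (List.mem_cons_of_mem _ hy))

-- value of an "insert at each key" loop (the in-place per-bucket sort)
theorem pv_sortfold_getD {κ ν : Type} [BEq κ] [LawfulBEq κ] (f : ν → ν) (dflt : ν) :
    ∀ (ks : List κ), ks.Nodup → ∀ (d : PySem.Dict κ ν) (c : κ),
      (ks.foldl (fun a k => a.insert k (f (a.getD k dflt))) d).getD c dflt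
        = if c ∈ ks then f (d.getD c dflt) else d.getD c dflt := by
  intro ks
  induction ks with
  | nil => intro _ d c; simp
  | cons k t ih =>
    intro hnd d c
    rcases List.nodup_cons.mp hnd with ⟨hk, ht⟩
    rw [List.foldl_cons, ih ht]
    by_cases hck : c = k
    · subst hck
      simp [hk, PySem.Dict.getD_insert_self]
    · rw [PySem.Dict.getD_insert_of_ne _ _ _ hck]
      by_cases hct : c ∈ t <;> simp [hct, hck]

-- the WORKFLOW_CATEGORIES phase: sections appended for present categories, their keys erased
theorem pv_phase1 :
    ∀ (cs : List String), cs.Nodup →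
    ∀ (sec : List (String × List (List (String × String))))
      (d : PySem.Dict (Option String) (List (List (String × String)))),
      (cs.foldl (fun (p : List (String × (List (List (String × String)))) ×
            PySem.Dict (Option String) (List (List (String × String)))) c =>
          if p.2.contains (some c) then
            (p.1 ++ [(c, p.2.getD (some c) [])], p.2.erase (some c))
          else p) (sec, d)).1
        = sec ++ (cs.filter (fun c => d.contains (some c))).map (fun c => (c, d.getD (some c) []))
      ∧ (cs.foldl (fun (p : List (String × (List (List (String × String)))) ×
            PySem.Dict (Option String) (List (List (String × String)))) c =>
          if p.2.contains (some c) then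
            (p.1 ++ [(c, p.2.getD (some c) [])], p.2.erase (some c))
          else p) (sec, d)).2.keys
        = d.keys.filter (fun k => !((cs.map some).contains k))
      ∧ ∀ k, k ∉ cs.map some →
          (cs.foldl (fun (p : List (String × (List (List (String × String)))) ×
            PySem.Dict (Option String) (List (List (String × String)))) c =>
          if p.2.contains (some c) then
            (p.1 ++ [(c, p.2.getD (some c) [])], p.2.erase (some c))
          else p) (sec, d)).2.get? k = d.get? k := by
  intro cs
  induction cs with
  | nil => intro _ sec d; exact ⟨by simp, by simp, fun k _ => rfl⟩
  | cons c t ih =>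
    intro hnd sec d
    rcases List.nodup_cons.mp hnd with ⟨hc, ht⟩
    simp only [List.foldl_cons]
    by_cases hcd : d.contains (some c) = true
    · rw [if_pos hcd]
      obtain ⟨h1, h2, h3⟩ := ih ht (sec ++ [(c, d.getD (some c) [])]) (d.erase (some c))
      refine ⟨?_, ?_, ?_⟩
      · rw [h1]
        have hfil : t.filter (fun c' => (d.erase (some c)).contains (some c'))
            = t.filter (fun c' => d.contains (some c')) := by
          refine List.filter_congr (fun x hx => ?_)
          exact pv_contains_erase_of_ne _ _ _ (by simp; exact fun e => hc (e ▸ hx))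
        rw [hfil, List.filter_cons_of_pos (p := fun c' => d.contains (some c')) hcd, List.map_cons]
        rw [List.map_congr_left (f := fun c' => (c', (d.erase (some c)).getD (some c') []))
          (g := fun c' => (c', d.getD (some c') []))
          (fun x hx => by
            have hxt : x ∈ t := List.mem_of_mem_filter hx
            have : (some x : Option String) ≠ some c := by
              simp; exact fun e => hc (e ▸ hxt)
            show (x, (d.erase (some c)).getD (some x) []) = (x, d.getD (some x) [])
            rw [pv_getD_erase_of_ne _ _ _ this])]
        simp [List.append_assoc]
      · rw [h2, pv_keys_erase, List.filter_filter]
        refine List.filter_congr (fun k _ => ?_)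
        by_cases hkc : k = some c <;> simp [hkc, Bool.and_comm]
      · intro k hk
        rw [List.map_cons] at hk
        have hk1 : k ≠ some c := fun e => hk (by simp [e])
        have hk2 : k ∉ List.map some t := fun h' => hk (List.mem_cons_of_mem _ h')
        rw [h3 k hk2, pv_get?_erase_of_ne _ _ _ hk1]
    · rw [if_neg hcd]
      obtain ⟨h1, h2, h3⟩ := ih ht sec d
      refine ⟨?_, ?_, ?_⟩
      · rw [h1, List.filter_cons_of_neg (p := fun c' => d.contains (some c')) hcd]
      · rw [h2]
        refine List.filter_congr (fun k hk => ?_)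
        have : k ≠ some c := fun e => hcd ((PySem.Dict.contains_iff_mem_keys d _).mpr (e ▸ hk))
        simp [this]
      · intro k hk
        exact h3 k (fun h' => hk (by simpa using (List.mem_cons_of_mem (some c) h')))

-- the extras phase: one section per (distinct) key, dict only loses those keys
theorem pv_phase2 :
    ∀ (ks : List (Option String)), ks.Nodup →
    ∀ (st : List (String × (List (List (String × String)))) ×
        PySem.Dict (Option String) (List (List (String × String)))),
      (ks.foldl (fun (p : List (String × (List (List (String × String)))) ×
            PySem.Dict (Option String) (List (List (String × String)))) k =>
          (p.1 ++ [(k.getD "", p.2.getD k [])], p.2.erase k)) st).1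
        = st.1 ++ ks.map (fun k => (k.getD "", st.2.getD k []))
      ∧ ∀ k, k ∉ ks →
          (ks.foldl (fun (p : List (String × (List (List (String × String)))) ×
            PySem.Dict (Option String) (List (List (String × String)))) k =>
          (p.1 ++ [(k.getD "", p.2.getD k [])], p.2.erase k)) st).2.get? k = st.2.get? k := by
  intro ks
  induction ks with
  | nil => intro _ st; exact ⟨by simp, fun k _ => rfl⟩
  | cons k t ih =>
    intro hnd st
    rcases List.nodup_cons.mp hnd with ⟨hk, ht⟩
    simp only [List.foldl_cons]
    obtain ⟨h1, h2⟩ := ih ht (st.1 ++ [(k.getD "", st.2.getD k [])], st.2.erase k)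
    refine ⟨?_, ?_⟩
    · rw [h1, List.map_cons]
      rw [List.map_congr_left (f := fun k' => ((k').getD "", (st.2.erase k).getD k' []))
        (g := fun k' => ((k').getD "", st.2.getD k' []))
        (fun x hx => by
          have hxk : x ≠ k := fun e => hk (e ▸ hx)
          show (x.getD "", (st.2.erase k).getD x []) = (x.getD "", st.2.getD x [])
          rw [pv_getD_erase_of_ne _ _ _ hxk])]
      simp [List.append_assoc]
    · intro k' hk'
      have hk1 : k' ≠ k := fun e => hk' (by simp [e])
      have hk2 : k' ∉ t := fun h' => hk' (List.mem_cons_of_mem _ h')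
      rw [h2 k' hk2, pv_get?_erase_of_ne _ _ _ hk1]

-- proof-side names for A's intermediate states (each is definitionally a piece of the port)
def pvD1 (ws : List (List (String × String))) : PySem.Dict (Option String) (List (List (String × String))) :=
  ws.foldl (fun d w => d.modify (pvCat w) [] (fun l => l ++ [w])) PySem.Dict.empty

def pvD2 (ws : List (List (String × String))) : PySem.Dict (Option String) (List (List (String × String))) :=
  (pvD1 ws).keys.foldl
    (fun d k => d.insert k (PySem.List.sorted (d.getD k []) (fun x => pvName x) false)) (pvD1 ws)

def pvSt1 (ws : List (List (String × String))) :
    List (String × (List (List (String × String)))) ×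
      PySem.Dict (Option String) (List (List (String × String))) :=
  pvWC.foldl
    (fun (p : List (String × (List (List (String × String)))) ×
            PySem.Dict (Option String) (List (List (String × String)))) c =>
      if p.2.contains (some c) then
        (p.1 ++ [(c, p.2.getD (some c) [])], p.2.erase (some c))
      else p)
    ([], pvD2 ws)

def pvExtras (ws : List (List (String × String))) : List (Option String) :=
  PySem.List.sorted ((pvSt1 ws).2.keys.filter (fun k => k.isSome))
    (fun k => PySem.Str.lower (k.getD "")) false

def pvSt2 (ws : List (List (String × String))) :
    List (String × (List (List (String × String)))) ×
      PySem.Dict (Option String) (List (List (String × String))) :=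
  (pvExtras ws).foldl
    (fun (p : List (String × (List (List (String × String)))) ×
            PySem.Dict (Option String) (List (List (String × String)))) k =>
      (p.1 ++ [(k.getD "", p.2.getD k [])], p.2.erase k)) (pvSt1 ws)

def pvSeen (ws : List (List (String × String))) : List (Option String) :=
  ws.foldl (fun s w => let c := pvCat w; if c ∈ s then s else s ++ [c]) []

-- B's section body applied to a category
def pvF (ws : List (List (String × String))) (c : Option String) :
    String × (List (List (String × String))) :=
  ((match c with | none => "Uncategorised" | some s => s),
   PySem.List.sorted (ws.filter (fun w => pvCat w == c)) (fun w => pvName w) false)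

theorem pv_seen_eq (ws : List (List (String × String))) :
    pvSeen ws = PySem.Set.ofList (ws.map pvCat) := by
  rw [pvSeen, PySem.Set.ofList_eq_foldl, List.foldl_map]
  refine PySem.List.foldl_congr_mem _ _ _ _ (fun s w _ => ?_)
  by_cases h : pvCat w ∈ s <;> simp [PySem.Set.add, h]

theorem pv_d1_getD (ws : List (List (String × String))) (c : Option String) :
    (pvD1 ws).getD c [] = ws.filter (fun w => pvCat w == c) := by
  have h := PySem.Dict.getD_foldl_modify_append (ws.map (fun w => (pvCat w, w)))
    PySem.Dict.empty c
  rw [List.foldl_map] at h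
  rw [pvD1]
  rw [show (fun (d : PySem.Dict (Option String) (List (List (String × String)))) w =>
      d.modify (pvCat w) [] (fun l => l ++ [w]))
    = (fun (d : PySem.Dict (Option String) (List (List (String × String)))) w =>
      d.modify (pvCat w, w).1 [] (fun x => x ++ [(pvCat w, w).2])) from rfl]
  rw [h, PySem.Dict.getD_empty, List.filter_map, List.map_map]
  simp [Function.comp_def]

theorem pv_d1_keys (ws : List (List (String × String))) :
    (pvD1 ws).keys = PySem.Set.ofList (ws.map pvCat) := by
  rw [pvD1, PySem.Dict.keys_foldl_modify_key ws pvCat [] (fun _ w => fun l => l ++ [w]),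
    PySem.Dict.keys_empty, PySem.Set.ofList_eq_foldl, PySem.Set.update]

theorem pv_d1_keys_nodup (ws : List (List (String × String))) : (pvD1 ws).keys.Nodup := by
  rw [pv_d1_keys]; exact PySem.Set.nodup_ofList _

theorem pv_d2_keys (ws : List (List (String × String))) : (pvD2 ws).keys = (pvD1 ws).keys := by
  rw [pvD2, PySem.Dict.keys_foldl_insert]
  exact pv_update_of_mem _ _ (fun x hx => hx)

theorem pv_d2_getD (ws : List (List (String × String))) (c : Option String)
    (hc : c ∈ PySem.Set.ofList (ws.map pvCat)) : (pvD2 ws).getD c [] = pvSF ws c := by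
  rw [pvD2, pv_sortfold_getD (fun l => PySem.List.sorted l (fun x => pvName x) false) []
      _ (pv_d1_keys_nodup ws),
    if_pos (by rw [pv_d1_keys]; exact hc), pv_d1_getD, pvSF]

-- ===== VERDICT (by name: the statement is the Claim_ definition above) =====
set_option maxHeartbeats 1000000 in
theorem group_workflows_for_display_spec : Claim_equal_group_workflows_for_display := by
  intro ws _ _
  unfold Spec_group_workflows_for_display
  have hA : group_workflows_for_display ws
      = (if (pvSt2 ws).2.contains none then
          (pvSt2 ws).1 ++ [("Uncategorised", (pvSt2 ws).2.getD none [])] else (pvSt2 ws).1) := rfl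
  have hB : group_workflows_for_display_alt ws
      = ((if none ∈ pvSeen ws then
          ((pvWC.filter (fun c => decide (some c ∈ pvSeen ws))).map some
            ++ PySem.List.sorted ((pvSeen ws).filter (fun c => c.isSome && !((pvWC.map some).contains c)))
                (fun c => PySem.Str.lower (c.getD "")) false) ++ [none]
          else ((pvWC.filter (fun c => decide (some c ∈ pvSeen ws))).map some
            ++ PySem.List.sorted ((pvSeen ws).filter (fun c => c.isSome && !((pvWC.map some).contains c)))
                (fun c => PySem.Str.lower (c.getD "")) false)).map (pvF ws)) := rfl
  have hWCnodup : pvWC.Nodup := by decide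
  have hP1 := pv_phase1 pvWC hWCnodup [] (pvD2 ws)
  have hSt1a : (pvSt1 ws).1
      = [] ++ (pvWC.filter (fun c => (pvD2 ws).contains (some c))).map
          (fun c => (c, (pvD2 ws).getD (some c) [])) := hP1.1
  have hSt1k : (pvSt1 ws).2.keys
      = (pvD2 ws).keys.filter (fun k => !((pvWC.map some).contains k)) := hP1.2.1
  have hSt1g : ∀ k, k ∉ pvWC.map some → (pvSt1 ws).2.get? k = (pvD2 ws).get? k := hP1.2.2
  have hExtras : pvExtras ws
      = PySem.List.sorted
          ((PySem.Set.ofList (ws.map pvCat)).filter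
            (fun c => c.isSome && !((pvWC.map some).contains c)))
          (fun c => PySem.Str.lower (c.getD "")) false := by
    rw [pvExtras, hSt1k, pv_d2_keys, pv_d1_keys, List.filter_filter]
  have hEnodup : (pvExtras ws).Nodup := by
    rw [hExtras]
    exact (PySem.List.sorted_perm _ _ _).symm.nodup ((PySem.Set.nodup_ofList _).filter _)
  have hEmem : ∀ k ∈ pvExtras ws,
      k.isSome = true ∧ k ∉ pvWC.map some ∧ k ∈ PySem.Set.ofList (ws.map pvCat) := by
    intro k hk
    rw [hExtras, PySem.List.mem_sorted] at hk
    rcases List.mem_filter.mp hk with ⟨hkS, hcond⟩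
    rcases Bool.and_eq_true_iff.mp hcond with ⟨h1, h2⟩
    refine ⟨h1, ?_, hkS⟩
    simpa using h2
  have hP2 := pv_phase2 (pvExtras ws) hEnodup (pvSt1 ws)
  have hSt2a : (pvSt2 ws).1
      = (pvSt1 ws).1 ++ (pvExtras ws).map (fun k => (k.getD "", (pvSt1 ws).2.getD k [])) := hP2.1
  have hSt2g : ∀ k, k ∉ pvExtras ws → (pvSt2 ws).2.get? k = (pvSt1 ws).2.get? k := hP2.2
  have hNoneNotWC : (none : Option String) ∉ pvWC.map some := by simp [pvWC]
  have hNoneNotE : (none : Option String) ∉ pvExtras ws := by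
    intro h
    simpa using (hEmem none h).1
  have hG2 : (pvSt2 ws).2.get? none = (pvD2 ws).get? none := by
    rw [hSt2g none hNoneNotE, hSt1g none hNoneNotWC]
  have hContNone : (pvSt2 ws).2.contains none
      = decide (none ∈ PySem.Set.ofList (ws.map pvCat)) := by
    rw [PySem.Dict.contains_eq_isSome_get?, hG2, ← PySem.Dict.contains_eq_isSome_get?,
      PySem.Dict.contains_eq_decide_mem_keys, pv_d2_keys, pv_d1_keys]
  have hSeen : pvSeen ws = PySem.Set.ofList (ws.map pvCat) := pv_seen_eq ws
  have hKnownFilter : pvWC.filter (fun c => (pvD2 ws).contains (some c))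
      = pvWC.filter (fun c => decide (some c ∈ PySem.Set.ofList (ws.map pvCat))) := by
    refine List.filter_congr (fun c _ => ?_)
    rw [PySem.Dict.contains_eq_decide_mem_keys, pv_d2_keys, pv_d1_keys]
  have hPiece1 : (pvWC.filter (fun c => decide (some c ∈ PySem.Set.ofList (ws.map pvCat)))).map
        (fun c => (c, (pvD2 ws).getD (some c) []))
      = ((pvWC.filter (fun c => decide (some c ∈ PySem.Set.ofList (ws.map pvCat)))).map some).map
          (pvF ws) := by
    rw [List.map_map]
    refine List.map_congr_left (fun c hc => ?_)
    have hcS : (some c : Option String) ∈ PySem.Set.ofList (ws.map pvCat) :=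
      of_decide_eq_true (List.mem_filter.mp hc).2
    show (c, (pvD2 ws).getD (some c) []) = pvF ws (some c)
    rw [pv_d2_getD ws _ hcS]
    rfl
  have hPiece2 : (pvExtras ws).map (fun k => (k.getD "", (pvSt1 ws).2.getD k []))
      = (pvExtras ws).map (pvF ws) := by
    refine List.map_congr_left (fun k hk => ?_)
    obtain ⟨hkSome, hkWC, hkS⟩ := hEmem k hk
    obtain ⟨s, rfl⟩ := Option.isSome_iff_exists.mp hkSome
    have hgd : (pvSt1 ws).2.getD (some s) [] = (pvD2 ws).getD (some s) [] := by
      simp only [PySem.Dict.getD, hSt1g _ hkWC]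
    show ((some s : Option String).getD "", (pvSt1 ws).2.getD (some s) []) = pvF ws (some s)
    rw [hgd, pv_d2_getD ws _ hkS]
    rfl
  rw [hA, hB, hSeen, ← hExtras, hContNone]
  rw [hSt2a, hSt1a, hKnownFilter, hPiece1, hPiece2]
  by_cases hnone : none ∈ PySem.Set.ofList (ws.map pvCat)
  · rw [if_pos (decide_eq_true hnone), if_pos hnone]
    have hUnc : ("Uncategorised", (pvSt2 ws).2.getD none []) = pvF ws none := by
      have : (pvSt2 ws).2.getD none [] = (pvD2 ws).getD none [] := by
        simp only [PySem.Dict.getD, hG2]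
      rw [this, pv_d2_getD ws _ hnone]
      rfl
    rw [hUnc]
    simp [List.map_append, List.append_assoc]
  · rw [if_neg (by simpa using hnone), if_neg hnone]
    simp [List.map_append]
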